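-- pv_equiv track=rewrite | github.com/daniel-reich/turbo-robot | f6X7pa38iQyoytJgr_4.py | increasing_word_weights
-- ===== SOURCE A (Python) =====
-- def increasing_word_weights(sentence):
--   def weight_finder(word):
--     l = list(word)
--     exclude = '/ ! , . ? \" \' @ : ; # ~'.split() #It is important to remove any punctuation as this throws off the calcuations!
--
--     codes = []
--
--     for l8r in l:
--       if l8r not in exclude:
--         code = ord(l8r)
--         codes.append(code)
--
--     s = sum(codes)
--
--     return s
--
--   word_weights = {}
--   values = []
--
--   sentence = sentence.split()
--
--   for word in sentence:
--
--     value = weight_finder(word)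
--
--     if value not in word_weights:
--       word_weights[value] = [word]
--     else:
--       word_weights[value].append(word)
--
--     if value not in values:
--       values.append(value)
--
--   values = sorted(values)
--
--   sorted_words = []
--
--   for value in values:
--     words = word_weights[value]
--     for word in words:
--       sorted_words.append(word)
--
--   if sorted_words == sentence:
--     return True
--   else:
--     return False
-- ===== SOURCE B (Python) =====
-- def increasing_word_weights(sentence):
--     exclude = set('/!,.?"\'@:;#~')
--     prev = None
--     for word in sentence.split():
--         w = sum(ord(c) for c in word if c not in exclude)
--         if prev is not None and w < prev:
--             return False
--         prev = w
--     return True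
-- ===== Notes on version B (the rewrite author's own statement) =====
-- stated objective: faster
-- what changed: Replaced A's group-by-weight dict plus sorted-values rebuild and whole-list comparison with a single pass that returns False as soon as a word's character-sum weight drops below the previous word's.
import Mathlib
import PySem

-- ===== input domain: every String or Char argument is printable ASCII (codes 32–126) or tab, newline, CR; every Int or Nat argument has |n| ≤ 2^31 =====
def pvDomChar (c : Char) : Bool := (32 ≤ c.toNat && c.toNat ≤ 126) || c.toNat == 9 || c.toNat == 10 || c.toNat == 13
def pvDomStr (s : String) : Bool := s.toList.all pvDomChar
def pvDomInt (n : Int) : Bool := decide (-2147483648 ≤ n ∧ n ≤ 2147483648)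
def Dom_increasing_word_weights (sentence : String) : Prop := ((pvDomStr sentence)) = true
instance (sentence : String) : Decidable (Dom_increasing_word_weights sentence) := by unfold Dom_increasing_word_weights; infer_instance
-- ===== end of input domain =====

-- B replaces A's group-by-weight dict + sort + rebuild + list comparison with a single pass
-- that compares each word's weight with the previous one (objective: faster, asymptotic).

-- ===== PORT A =====
-- Python's exclude list is '/ ! , . ? " \' @ : ; # ~'.split(), twelve one-character strings;
-- iterating a Python str yields one-character strings, modelled exactly by Char here.
def pvExcludeA : List Char := ['/', '!', ',', '.', '?', '"', '\'', '@', ':', ';', '#', '~']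

def pvWeightA (word : String) : Int :=
  let l := word.toList
  let codes : List Int :=
    l.foldl (fun codes l8r =>
      if pvExcludeA.contains l8r = false then codes ++ [(l8r.toNat : Int)] else codes) []
  codes.sum

def increasing_word_weights (sentence : String) : Bool :=
  let ws := PySem.Str.split₀ sentence
  let st := ws.foldl (fun st word =>
      (if st.1.contains (pvWeightA word) = false then st.1.insert (pvWeightA word) [word]
       else st.1.modify (pvWeightA word) [] (fun l => l ++ [word]),
       if st.2.contains (pvWeightA word) = false then st.2 ++ [pvWeightA word] else st.2))
    ((PySem.Dict.empty : PySem.Dict Int (List String)), ([] : List Int))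
  let values := PySem.List.sorted st.2 (fun v => v) false
  let sorted_words := values.foldl (fun acc value =>
      (st.1.getD value []).foldl (fun acc word => acc ++ [word]) acc) []
  if sorted_words == ws then true else false

-- ===== PORT B =====
def pvExcludeB : PySem.Set Char := PySem.Set.ofList "/!,.?\"'@:;#~".toList

def pvWeightB (word : String) : Int :=
  ((word.toList.filter (fun c => !(pvExcludeB.contains c))).map (fun c => (c.toNat : Int))).sum

def pvAltGo (prev : Option Int) (ws : List String) : Bool :=
  match ws with
  | [] => true
  | w :: rest =>
    let wt := pvWeightB w
    match prev with
    | some p => if wt < p then false else pvAltGo (some wt) rest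
    | none => pvAltGo (some wt) rest

def increasing_word_weights_alt (sentence : String) : Bool :=
  pvAltGo none (PySem.Str.split₀ sentence)

-- ===== PRECONDITION & SPEC =====
def Spec_increasing_word_weights (sentence : String) (out : Bool) : Prop := out = increasing_word_weights_alt sentence
instance (sentence : String) (out : Bool) : Decidable (Spec_increasing_word_weights sentence out) := by unfold Spec_increasing_word_weights; infer_instance

-- ===== CLAIM (what is proved, stated in full; the proofs are below) =====
def Claim_equal_increasing_word_weights : Prop := ∀ (sentence : String), Dom_increasing_word_weights sentence → Spec_increasing_word_weights sentence (increasing_word_weights sentence)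

-- ===== LEMMAS AND PROOFS =====

-- the two exclusion containers hold the same characters in the same order
lemma pv_exclude_eq : pvExcludeB = pvExcludeA := by decide

-- the two weight functions agree
lemma pv_weight_eq (w : String) : pvWeightA w = pvWeightB w := by
  unfold pvWeightA pvWeightB
  have hstep : (fun (codes : List Int) (l8r : Char) =>
      if pvExcludeA.contains l8r = false then codes ++ [(l8r.toNat : Int)] else codes)
    = (fun codes l8r =>
      if (!(pvExcludeB.contains l8r)) = true then codes ++ [(l8r.toNat : Int)] else codes) := by
    funext codes c
    rw [pv_exclude_eq]
    cases h : (pvExcludeA : List Char).contains c <;> simp <;> simpa using h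
  rw [hstep]
  simp only [PySem.List.foldl_append_if]
  simp

lemma pv_get?_none {d : PySem.Dict Int (List String)} {v : Int}
    (h : d.contains v = false) : d.get? v = none := by
  simp [PySem.Dict.contains, List.any_eq_false] at h
  simp [PySem.Dict.get?, List.find?_eq_none]
  exact fun p hp => by simpa using h p hp

-- A's if/else dict update is one modify step
lemma pv_dict_step (d : PySem.Dict Int (List String)) (v : Int) (w : String) :
    (if d.contains v = false then d.insert v [w] else d.modify v [] (fun l => l ++ [w]))
      = d.modify v [] (fun l => l ++ [w]) := by
  cases h : d.contains v
  · simp [PySem.Dict.modify, PySem.Dict.getD, pv_get?_none h]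
  · simp

-- A's dict fold groups the words by weight, in order
lemma pv_groups (ws : List String) (c : Int) :
    (ws.foldl (fun d w =>
        if d.contains (pvWeightA w) = false then d.insert (pvWeightA w) [w]
        else d.modify (pvWeightA w) [] (fun l => l ++ [w]))
      (PySem.Dict.empty : PySem.Dict Int (List String))).getD c []
    = ws.filter (fun w => pvWeightA w == c) := by
  have h1 : (fun (d : PySem.Dict Int (List String)) (w : String) =>
      if d.contains (pvWeightA w) = false then d.insert (pvWeightA w) [w]
      else d.modify (pvWeightA w) [] (fun l => l ++ [w]))
    = (fun d w => d.modify (pvWeightA w) [] (fun l => l ++ [w])) := by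
    funext d w; exact pv_dict_step d (pvWeightA w) w
  rw [h1]
  have h2 : ws.foldl (fun (d : PySem.Dict Int (List String)) w =>
        d.modify (pvWeightA w) [] (fun l => l ++ [w])) PySem.Dict.empty
      = (ws.map (fun w => (pvWeightA w, w))).foldl
          (fun d p => d.modify p.1 [] (fun l => l ++ [p.2])) PySem.Dict.empty := by
    rw [List.foldl_map]
  rw [h2, PySem.Dict.getD_foldl_modify_append]
  simp [List.filter_map, Function.comp_def]

-- A's values accumulator is the ordered set of weights
lemma pv_vals (ws : List String) :
    ws.foldl (fun vals w =>
        if vals.contains (pvWeightA w) = false then vals ++ [pvWeightA w] else vals) []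
      = PySem.Set.ofList (ws.map pvWeightA) := by
  have h1 : (fun (vals : List Int) (w : String) =>
      if vals.contains (pvWeightA w) = false then vals ++ [pvWeightA w] else vals)
    = (fun vals w => PySem.Set.add vals (pvWeightA w)) := by
    funext vals w
    cases h : vals.contains (pvWeightA w) <;> simp [PySem.Set.add] <;> simpa using h
  rw [h1, PySem.Set.ofList, ← List.foldl_map]
  rfl

-- A reduces to: rebuild the words grouped by sorted weight and compare with the word list
lemma pv_A_eq (s : String) :
    increasing_word_weights s
      = (((PySem.List.sorted (PySem.Set.ofList ((PySem.Str.split₀ s).map pvWeightA))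
            (fun v => v) false).flatMap
          (fun v => (PySem.Str.split₀ s).filter (fun w => pvWeightA w == v)))
        == PySem.Str.split₀ s) := by
  have hp := PySem.List.foldl_prod_mk
    (fun (d : PySem.Dict Int (List String)) (word : String) =>
      if d.contains (pvWeightA word) = false then d.insert (pvWeightA word) [word]
      else d.modify (pvWeightA word) [] (fun l => l ++ [word]))
    (fun (vals : List Int) (word : String) =>
      if vals.contains (pvWeightA word) = false then vals ++ [pvWeightA word] else vals)
    (PySem.Str.split₀ s) PySem.Dict.empty []
  simp only [increasing_word_weights, hp, PySem.List.foldl_append_eq_flatMap, pv_vals]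
  simp [pv_groups]
  rw [Bool.eq_iff_iff]
  simp


-- F vs ws rebuilds ws when the weights are nondecreasing
lemma pv_flat_eq (key : String → Int) :
    ∀ (vs : List Int), vs.Pairwise (· < ·) →
    ∀ (ws : List String), (ws.map key).Pairwise (· ≤ ·) → (∀ w ∈ ws, key w ∈ vs) →
    vs.flatMap (fun v => ws.filter (fun w => key w == v)) = ws := by
  intro vs
  induction vs with
  | nil =>
    intro _ ws _ hmem
    cases ws with
    | nil => simp
    | cons w wt => exact absurd (hmem w (by simp)) (by simp)
  | cons v vt ihvs =>
    intro hvs ws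
    have hvlt : ∀ v' ∈ vt, v < v' := (List.pairwise_cons.mp hvs).1
    have hvt : vt.Pairwise (· < ·) := (List.pairwise_cons.mp hvs).2
    induction ws with
    | nil => simp
    | cons w wt ihws =>
      intro hkeys hmem
      have hk' : (∀ u ∈ wt, key w ≤ key u) ∧ (wt.map key).Pairwise (· ≤ ·) := by
        simpa using hkeys
      have hw := hk'.1
      have hkt := hk'.2
      by_cases hkw : key w = v
      · have hcongr : vt.flatMap (fun v' => (w :: wt).filter (fun u => key u == v'))
            = vt.flatMap (fun v' => wt.filter (fun u => key u == v')) := by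
          apply List.flatMap_congr
          intro v' hv'
          have : (key w == v') = false := by
            simp [hkw]
            exact ne_of_lt (hvlt v' hv')
          simp [this]
        have hrest : (v :: vt).flatMap (fun v' => wt.filter (fun u => key u == v')) = wt := by
          apply ihws hkt
          · intro u hu
            exact hmem u (by simp [hu])
        simp only [List.flatMap_cons] at hrest ⊢
        rw [hcongr]
        simp only [List.filter_cons]
        simp [hkw]
        exact hrest
      · have hwvt : key w ∈ vt := by
          have := hmem w (by simp)
          simpa [hkw] using this
        have hvkw : v < key w := hvlt _ hwvt
        have hallvt : ∀ u ∈ w :: wt, key u ∈ vt := by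
          intro u hu
          rcases List.mem_cons.mp hu with rfl | hu'
          · exact hwvt
          · have := hmem u (by simp [hu'])
            rcases List.mem_cons.mp this with h | h
            · exfalso
              have := hw u hu'
              omega
            · exact h
        have hfilt : (w :: wt).filter (fun u => key u == v) = [] := by
          rw [List.filter_eq_nil_iff]
          intro u hu
          have := hallvt u hu
          have := hvlt _ this
          simp; omega
        simp only [List.flatMap_cons, hfilt, List.nil_append]
        exact ihvs hvt (w :: wt) hkeys hallvt

-- the rebuilt list always has nondecreasing weights
lemma pv_flat_pairwise (key : String → Int) (vs : List Int) (ws : List String)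
    (hvs : vs.Pairwise (· < ·)) :
    ((vs.flatMap (fun v => ws.filter (fun w => key w == v))).map key).Pairwise (· ≤ ·) := by
  induction vs with
  | nil => simp
  | cons v vt ih =>
    have hvlt : ∀ v' ∈ vt, v < v' := (List.pairwise_cons.mp hvs).1
    have hvt := (List.pairwise_cons.mp hvs).2
    simp only [List.flatMap_cons, List.map_append]
    rw [List.pairwise_append]
    refine ⟨?_, ih hvt, ?_⟩
    · rw [List.pairwise_map, List.pairwise_iff_forall_sublist]
      intro a b hsub
      have ha := (List.mem_filter.mp (hsub.subset (show a ∈ [a, b] by simp))).2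
      have hb := (List.mem_filter.mp (hsub.subset (show b ∈ [a, b] by simp))).2
      simp at ha hb; omega
    · intro a ha b hb
      rcases List.mem_map.mp ha with ⟨u, hu, rfl⟩
      have ha' : key u = v := by simpa using (List.mem_filter.mp hu).2
      rcases List.mem_map.mp hb with ⟨u', hum, rfl⟩
      rcases List.mem_flatMap.mp hum with ⟨v', hv', hu''⟩
      have hb' : key u' = v' := by simpa using (List.mem_filter.mp hu'').2
      have := hvlt v' hv'
      omega

-- B's loop tests exactly that the weight sequence is nondecreasing
lemma pv_altGo_some (ws : List String) :
    ∀ p, (pvAltGo (some p) ws = true ↔ (p :: ws.map pvWeightB).Pairwise (· ≤ ·)) := by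
  induction ws with
  | nil => intro p; simp [pvAltGo]
  | cons w wt ih =>
    intro p
    simp only [pvAltGo]
    by_cases h : pvWeightB w < p
    · simp only [if_pos h]
      constructor
      · intro hF; cases hF
      · intro hp
        have := (List.pairwise_cons.mp hp).1 (pvWeightB w) (by simp)
        omega
    · simp only [if_neg h]
      rw [ih (pvWeightB w)]
      constructor
      · intro hp
        rw [List.map_cons, List.pairwise_cons]
        refine ⟨?_, hp⟩
        intro b hb
        rcases List.mem_cons.mp hb with rfl | hb'
        · omega
        · have h1 := (List.pairwise_cons.mp hp).1 b hb'
          omega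
      · intro hp
        have := (List.pairwise_cons.mp hp).2
        simpa using this

lemma pv_alt_iff (s : String) :
    increasing_word_weights_alt s = true
      ↔ ((PySem.Str.split₀ s).map pvWeightB).Pairwise (· ≤ ·) := by
  unfold increasing_word_weights_alt
  cases h : PySem.Str.split₀ s with
  | nil => simp [pvAltGo]
  | cons w wt =>
    simp only [pvAltGo]
    rw [pv_altGo_some]
    simp

-- ===== VERDICT (by name: the statement is the Claim_ definition above) =====
theorem increasing_word_weights_spec : Claim_equal_increasing_word_weights := by
  intro s _
  unfold Spec_increasing_word_weights
  rw [Bool.eq_iff_iff, pv_A_eq, pv_alt_iff, beq_iff_eq]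
  set ws := PySem.Str.split₀ s with hws
  have hkeyeq : (fun w => pvWeightA w) = (fun w => pvWeightB w) := funext pv_weight_eq
  have hvs : (PySem.List.sorted (PySem.Set.ofList (ws.map pvWeightA)) (fun v => v) false).Pairwise (· < ·) := by
    have h1 := PySem.List.sorted_pairwise (PySem.Set.ofList (ws.map pvWeightA)) (fun v => v)
    have h2 : (PySem.List.sorted (PySem.Set.ofList (ws.map pvWeightA)) (fun v => v) false).Nodup :=
      (PySem.List.sorted_perm _ _ _).nodup_iff.mpr (PySem.Set.nodup_ofList _)
    exact (h1.and h2).imp (fun h => lt_of_le_of_ne h.1 h.2)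
  constructor
  · intro hEq
    have := pv_flat_pairwise pvWeightA _ ws hvs
    rw [hEq] at this
    simpa [hkeyeq] using this
  · intro hpair
    apply pv_flat_eq pvWeightA _ hvs
    · simpa [hkeyeq] using hpair
    · intro w hw
      rw [PySem.List.mem_sorted]
      rw [PySem.Set.mem_ofList]
      exact List.mem_map.mpr ⟨w, hw, rfl⟩
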